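-- pv_equiv track=rewrite | github.com/Tesilia/AdventOfCode_2022 | main.py | calculate_x2
-- ===== SOURCE A (Python) =====
-- def calculate_x2(x, cycle, program):
--     findIndex = [i for i, p in list(enumerate(program)) if p[0] == cycle or p[0]+1 == cycle]
--     for i in range(0, findIndex[0]):
--             if "addx" in program[i][1]:
--                 x += int(program[i][1].split(' ')[1])
--     if program[findIndex[0]][0] != cycle:
--         if "addx" in program[findIndex[0]][1]:
--                 x += int(program[findIndex[0]][1].split(' ')[1])
--     return x
-- ===== SOURCE B (Python) =====
-- def calculate_x2(x, cycle, program):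
--     for p in program:
--         if p[0] == cycle or p[0] + 1 == cycle:
--             if p[0] != cycle and "addx" in p[1]:
--                 x += int(p[1].split(' ')[1])
--             return x
--         if "addx" in p[1]:
--             x += int(p[1].split(' ')[1])
--     raise IndexError('list index out of range')
-- ===== Notes on version B (the rewrite author's own statement) =====
-- stated objective: simpler
-- what changed: Replaces A's three-phase structure (build the full list of matching indices with enumerate, then a separate range loop re-indexing program, then a final indexed fixup) by one fused scan over the entries themselves that accumulates x and returns as soon as the first matching entry is seen.
import Mathlib
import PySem

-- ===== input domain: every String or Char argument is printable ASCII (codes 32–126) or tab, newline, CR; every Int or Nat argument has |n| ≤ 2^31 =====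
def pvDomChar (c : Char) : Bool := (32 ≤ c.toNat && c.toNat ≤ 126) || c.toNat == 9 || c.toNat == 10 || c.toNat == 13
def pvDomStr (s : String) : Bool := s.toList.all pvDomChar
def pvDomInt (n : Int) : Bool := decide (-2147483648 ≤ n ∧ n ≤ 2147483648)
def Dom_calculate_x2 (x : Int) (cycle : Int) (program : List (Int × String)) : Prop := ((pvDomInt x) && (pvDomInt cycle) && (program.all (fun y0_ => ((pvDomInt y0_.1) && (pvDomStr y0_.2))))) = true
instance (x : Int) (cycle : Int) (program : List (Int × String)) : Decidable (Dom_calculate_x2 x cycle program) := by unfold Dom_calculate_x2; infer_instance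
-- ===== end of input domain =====

-- B replaces A's three-phase structure (collect all matching indices, separate range loop re-indexing the
-- list, indexed fixup) by a single scan over the entries that returns at the first match; objective: simpler.

-- int(s.split(' ')[1]) — shared transliteration of the identical Python subexpression in Source A and Source B;
-- the .getD defaults are only reached where Python raises (outside Pre_).
def pvParse (s : String) : Int :=
  (PySem.Int.ofStr? (PySem.List.pyGetD ((PySem.Str.split? s " ").getD []) 1 "")).getD 0

-- ===== PORT A =====
def calculate_x2 (x : Int) (cycle : Int) (program : List (Int × String)) : Int :=
  let findIndex : List Int :=
    (PySem.List.enumerate program).filterMap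
      (fun ip => if ip.2.1 == cycle || ip.2.1 + 1 == cycle then some ip.1 else none)
  match PySem.List.pyGet? findIndex 0 with
  | none => 0  -- Python raises IndexError here (no matching cycle); excluded by Pre_
  | some k =>
    let x1 := (PySem.List.pyRange 0 k 1).foldl
      (fun acc i =>
        let p := PySem.List.pyGetD program i (0, "")
        if PySem.Str.isIn "addx" p.2 then acc + pvParse p.2 else acc) x
    let pk := PySem.List.pyGetD program k (0, "")
    if pk.1 != cycle then
      (if PySem.Str.isIn "addx" pk.2 then x1 + pvParse pk.2 else x1)
    else x1

-- ===== PORT B =====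
def calculate_x2_alt (x : Int) (cycle : Int) (program : List (Int × String)) : Int :=
  match program with
  | [] => 0  -- Source B raises IndexError here (no matching cycle); excluded by Pre_
  | p :: rest =>
    if p.1 == cycle || p.1 + 1 == cycle then
      (if p.1 != cycle && PySem.Str.isIn "addx" p.2 then x + pvParse p.2 else x)
    else
      calculate_x2_alt (if PySem.Str.isIn "addx" p.2 then x + pvParse p.2 else x) cycle rest

-- ===== PRECONDITION & SPEC =====
def pvMatches (c : Int) (p : Int × String) : Bool := p.1 == c || p.1 + 1 == c

-- entry parses: if "addx" is in the string, token 1 exists and int() accepts it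
def pvOkB (p : Int × String) : Bool :=
  !(PySem.Str.isIn "addx" p.2) ||
    ((PySem.List.pyGet? ((PySem.Str.split? p.2 " ").getD []) 1).bind PySem.Int.ofStr?).isSome

-- Pre_ = exactly the inputs where the Python A returns: some entry matches the cycle (else IndexError on
-- findIndex[0]), every entry strictly before the first match parses, and the matching entry parses when
-- its cycle field differs from `cycle` (else ValueError/IndexError from int(...split(' ')[1])).
def Pre_calculate_x2 (_x : Int) (cycle : Int) (program : List (Int × String)) : Prop :=
  ((program.findIdx? (pvMatches cycle)).elim false (fun k =>
      (program.take k).all pvOkB &&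
      ((program.getD k (0, "")).1 == cycle || pvOkB (program.getD k (0, ""))))) = true
instance (x : Int) (cycle : Int) (program : List (Int × String)) : Decidable (Pre_calculate_x2 x cycle program) := by unfold Pre_calculate_x2; infer_instance

def pvWitness_calculate_x2 : Int × Int × (List (Int × String)) := (1, 3, [(1, "noop"), (2, "addx 5")])

def Spec_calculate_x2 (x : Int) (cycle : Int) (program : List (Int × String)) (out : Int) : Prop := out = calculate_x2_alt x cycle program
instance (x : Int) (cycle : Int) (program : List (Int × String)) (out : Int) : Decidable (Spec_calculate_x2 x cycle program out) := by unfold Spec_calculate_x2; infer_instance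

-- ===== CLAIM (what is proved, stated in full; the proofs are below) =====
def Claim_equal_calculate_x2 : Prop := ∀ (x : Int) (cycle : Int) (program : List (Int × String)), Dom_calculate_x2 x cycle program → Pre_calculate_x2 x cycle program → Spec_calculate_x2 x cycle program (calculate_x2 x cycle program)

-- ===== LEMMAS AND PROOFS =====

-- shared shape of one accumulation step and of the final fixup at the matching entry
def pvStep (acc : Int) (p : Int × String) : Int :=
  if PySem.Str.isIn "addx" p.2 then acc + pvParse p.2 else acc
def pvFin (c x1 : Int) (p : Int × String) : Int :=
  if p.1 != c then pvStep x1 p else x1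

-- head of A's findIndex list = first matching index, shifted by the enumerate start
lemma pv_headIdx (c : Int) (l : List (Int × String)) (s : Int) :
    ((PySem.List.enumerate l s).filterMap
      (fun ip => if ip.2.1 == c || ip.2.1 + 1 == c then some ip.1 else none)).head?
    = (l.findIdx? (pvMatches c)).map (fun n => s + (n : Int)) := by
  induction l generalizing s with
  | nil => simp [PySem.List.enumerate_nil]
  | cons p rest ih =>
    rw [PySem.List.enumerate_cons]
    by_cases h : (p.1 == c || p.1 + 1 == c) = true
    · have h' : p.1 = c ∨ p.1 + 1 = c := by simpa using h
      simp [h', List.findIdx?_cons, pvMatches, h]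
    · simp only [List.filterMap_cons, h, List.findIdx?_cons, Bool.false_eq_true, ite_false,
        pvMatches] at *
      rw [ih (s + 1)]
      cases rest.findIdx? (pvMatches c) with
      | none => simp
      | some m => simp; omega

-- A's range loop = fold of pvStep over the first k entries
lemma pv_loopA (program : List (Int × String)) (k : Nat) (hk : k ≤ program.length) (x : Int) :
    (PySem.List.pyRange 0 (k : Int) 1).foldl
      (fun acc i =>
        let p := PySem.List.pyGetD program i (0, "")
        if PySem.Str.isIn "addx" p.2 then acc + pvParse p.2 else acc) x
    = (program.take k).foldl pvStep x := by
  induction k generalizing x with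
  | zero => simp [PySem.List.pyRange_one_eq_nil]
  | succ n ih =>
    have h1 : ((n + 1 : Nat) : Int) = (n : Int) + 1 := by push_cast; ring
    rw [h1, PySem.List.pyRange_one_succ_right (by positivity), List.foldl_append,
      ih (by omega)]
    have hn : n < program.length := by omega
    have hg : PySem.List.pyGetD program ((n : Nat) : Int) (0, "") = program[n] := by
      rw [PySem.List.pyGetD_natCast]; exact List.getD_eq_getElem program (0, "") hn
    have ht : program.take (n + 1) = program.take n ++ [program[n]] := by
      rw [List.take_add_one, List.getElem?_eq_getElem hn]; rfl
    rw [ht, List.foldl_append]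
    simp only [List.foldl_cons, List.foldl_nil, hg, pvStep]

-- characterization of A's port at the first matching index
lemma pv_A_eq (x c : Int) (program : List (Int × String)) (k : Nat)
    (h : program.findIdx? (pvMatches c) = some k) :
    calculate_x2 x c program = pvFin c ((program.take k).foldl pvStep x) (program.getD k (0, "")) := by
  have hk : k < program.length := (List.findIdx?_eq_some_iff_findIdx_eq.mp h).1
  unfold calculate_x2
  have h0 : PySem.List.pyGet? ((PySem.List.enumerate program).filterMap
      (fun ip => if ip.2.1 == c || ip.2.1 + 1 == c then some ip.1 else none)) 0
      = some (k : Int) := by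
    rw [PySem.List.pyGet?_zero, ← List.head?_eq_getElem?, pv_headIdx c program 0, h]
    simp
  simp only [h0]
  rw [pv_loopA program k (le_of_lt hk) x]
  simp [pvFin, pvStep, PySem.List.pyGetD_natCast]

-- characterization of B's port at the first matching index
lemma pv_B_eq (c : Int) (program : List (Int × String)) (k : Nat) (x : Int)
    (h : program.findIdx? (pvMatches c) = some k) :
    calculate_x2_alt x c program = pvFin c ((program.take k).foldl pvStep x) (program.getD k (0, "")) := by
  induction program generalizing k x with
  | nil => simp [List.findIdx?_nil] at h
  | cons p rest ih =>
    rw [List.findIdx?_cons] at h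
    by_cases hp : pvMatches c p = true
    · rw [hp] at h
      simp only [ite_true] at h
      cases h
      unfold calculate_x2_alt
      rw [if_pos (by simpa [pvMatches] using hp)]
      simp only [List.take_zero, List.foldl_nil, List.getD, pvFin, pvStep]
      by_cases h1 : (p.1 != c) = true
      · by_cases h2 : PySem.Str.isIn "addx" p.2 = true <;> simp [h1]
      · simp at h1; simp [h1]
    · rw [Bool.not_eq_true] at hp
      rw [hp] at h
      simp only [Bool.false_eq_true, ite_false] at h
      cases hm : rest.findIdx? (pvMatches c) with
      | none => rw [hm] at h; simp at h
      | some m =>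
        rw [hm] at h
        simp only [Option.map_some] at h
        cases h
        unfold calculate_x2_alt
        rw [if_neg (by simpa [pvMatches] using hp)]
        rw [ih m _ hm]
        simp only [List.take_succ_cons, List.foldl_cons, List.getD_cons_succ]
        rfl

-- ===== VERDICT (by name: the statement is the Claim_ definition above) =====
theorem calculate_x2_spec : Claim_equal_calculate_x2 := by
  intro x cycle program _ hpre
  unfold Pre_calculate_x2 at hpre
  unfold Spec_calculate_x2
  cases h : program.findIdx? (pvMatches cycle) with
  | none => rw [h] at hpre; simp [Option.elim] at hpre
  | some k => rw [pv_A_eq x cycle program k h, pv_B_eq cycle program k x h]
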